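-- pv_equiv track=rewrite | github.com/hardnp/vehicle_routing_problem | script/solomon2sdvrptwsd.py | get_vehicles_from_demand
-- ===== SOURCE A (Python) =====
-- def get_vehicles_from_demand(category, nsmall, nmedium, nbig):
--     """Get vehicle ides for each category of customer"""
--     fs, ls = 0, nsmall
--     fm, lm = nsmall, nsmall+nmedium
--     fb, lb = nsmall+nmedium, nsmall+nmedium+nbig
--     # 0 is the smallest customer, 3 is the biggest
--     vehicles_per_category = {
--         0: list(range(fs, ls)),
--         1: list(range(fs, ls)) + list(range(fm, lm)),
--         2: list(range(fs, ls)) + list(range(fm, lm)) + list(range(fb, lb)),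
--         3: list(range(fm, lm)) + list(range(fb, lb))
--     }
--     return [str(e) for e in vehicles_per_category[category]]
-- ===== SOURCE B (Python) =====
-- def get_vehicles_from_demand(category, nsmall, nmedium, nbig):
--     """Get vehicle ides for each category of customer"""
--     # Inverted mapping: instead of a dict from category to its id lists,
--     # sweep the three fleet segments once, keeping each segment whose
--     # category set contains the requested category.
--     segments = [
--         (0, nsmall, (0, 1, 2)),
--         (nsmall, nsmall + nmedium, (1, 2, 3)),
--         (nsmall + nmedium, nsmall + nmedium + nbig, (2, 3)),
--     ]
--     ids = []
--     for first, last, cats in segments: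
--         if category in cats:
--             ids.extend(str(e) for e in range(first, last))
--     return ids
-- ===== Notes on version B (the rewrite author's own statement) =====
-- stated objective: simpler
-- what changed: B inverts A's mapping: instead of a dict from each category to its pre-built concatenation of id lists, B sweeps the three fleet segments once, appending each segment whose category set contains the request.
import Mathlib
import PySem

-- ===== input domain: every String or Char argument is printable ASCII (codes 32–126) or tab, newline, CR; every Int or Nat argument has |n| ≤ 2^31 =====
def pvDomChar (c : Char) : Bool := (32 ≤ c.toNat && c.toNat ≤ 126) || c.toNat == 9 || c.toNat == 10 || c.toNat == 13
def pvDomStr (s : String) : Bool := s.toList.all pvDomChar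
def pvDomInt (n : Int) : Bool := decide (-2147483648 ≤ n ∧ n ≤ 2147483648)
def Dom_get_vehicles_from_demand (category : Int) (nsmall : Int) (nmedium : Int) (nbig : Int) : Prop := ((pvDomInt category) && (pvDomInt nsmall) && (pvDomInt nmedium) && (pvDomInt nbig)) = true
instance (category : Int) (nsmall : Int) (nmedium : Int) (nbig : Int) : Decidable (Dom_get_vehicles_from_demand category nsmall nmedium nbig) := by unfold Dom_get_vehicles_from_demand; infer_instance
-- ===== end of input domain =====

-- B replaces A's dict from category to materialized id lists by one sweep over the three
-- fleet segments, keeping each segment whose category set contains the request; objective: simpler.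


-- ===== PORT A =====
def get_vehicles_from_demand (category : Int) (nsmall : Int) (nmedium : Int) (nbig : Int) : List String :=
  let fs : Int := 0; let ls := nsmall
  let fm := nsmall; let lm := nsmall + nmedium
  let fb := nsmall + nmedium; let lb := nsmall + nmedium + nbig
  let vehicles_per_category : PySem.Dict Int (List Int) :=
    ((((PySem.Dict.empty.insert 0 (PySem.List.pyRange fs ls 1)).insert
        1 (PySem.List.pyRange fs ls 1 ++ PySem.List.pyRange fm lm 1)).insert
        2 (PySem.List.pyRange fs ls 1 ++ PySem.List.pyRange fm lm 1 ++ PySem.List.pyRange fb lb 1)).insert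
        3 (PySem.List.pyRange fm lm 1 ++ PySem.List.pyRange fb lb 1))
  -- dict lookup raises KeyError for category ∉ {0,1,2,3}: excluded by Pre_; .getD [] is never hit inside Pre_
  ((vehicles_per_category.get? category).getD []).map PySem.Int.toStr

-- ===== PORT B =====
def get_vehicles_from_demand_alt (category : Int) (nsmall : Int) (nmedium : Int) (nbig : Int) : List String :=
  let segments : List (Int × Int × List Int) :=
    [(0, nsmall, [0, 1, 2]),
     (nsmall, nsmall + nmedium, [1, 2, 3]),
     (nsmall + nmedium, nsmall + nmedium + nbig, [2, 3])]
  segments.foldl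
    (fun ids seg =>
      if seg.2.2.contains category then
        ids ++ (PySem.List.pyRange seg.1 seg.2.1 1).map PySem.Int.toStr
      else ids) []

-- ===== PRECONDITION & SPEC =====
-- Pre_ excludes exactly the categories outside 0–3, on which A's dict lookup raises KeyError.
def Pre_get_vehicles_from_demand (category : Int) (nsmall : Int) (nmedium : Int) (nbig : Int) : Prop :=
  category = 0 ∨ category = 1 ∨ category = 2 ∨ category = 3
instance (category : Int) (nsmall : Int) (nmedium : Int) (nbig : Int) : Decidable (Pre_get_vehicles_from_demand category nsmall nmedium nbig) := by unfold Pre_get_vehicles_from_demand; infer_instance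

def pvWitness_get_vehicles_from_demand : Int × Int × Int × Int := (2, 2, 1, 3)

def Spec_get_vehicles_from_demand (category : Int) (nsmall : Int) (nmedium : Int) (nbig : Int) (out : List String) : Prop := out = get_vehicles_from_demand_alt category nsmall nmedium nbig
instance (category : Int) (nsmall : Int) (nmedium : Int) (nbig : Int) (out : List String) : Decidable (Spec_get_vehicles_from_demand category nsmall nmedium nbig out) := by unfold Spec_get_vehicles_from_demand; infer_instance

-- ===== CLAIM =====
def Claim_equal_get_vehicles_from_demand : Prop := ∀ (category : Int) (nsmall : Int) (nmedium : Int) (nbig : Int), Dom_get_vehicles_from_demand category nsmall nmedium nbig → Pre_get_vehicles_from_demand category nsmall nmedium nbig → Spec_get_vehicles_from_demand category nsmall nmedium nbig (get_vehicles_from_demand category nsmall nmedium nbig)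

-- ===== LEMMAS AND PROOFS =====

-- ===== VERDICT =====
theorem get_vehicles_from_demand_spec : Claim_equal_get_vehicles_from_demand := by
  intro category nsmall nmedium nbig _ hc
  unfold Spec_get_vehicles_from_demand get_vehicles_from_demand get_vehicles_from_demand_alt
  rcases hc with h | h | h | h <;> subst h <;>
    simp [PySem.Dict.get?, PySem.Dict.insert, PySem.Dict.empty, List.foldl, List.append_assoc]
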